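-- pv_equiv track=rewrite | github.com/Park-Minjoo/CODINGTEST_STUDY | PCCP/운영체제/Minjoo Park.py | solution
-- ===== SOURCE A (Python) =====
-- import heapq
-- from collections import defaultdict
--
-- def solution(program):
--     program.sort(key=lambda x: (x[1], x[0]))
--
--     time = 0
--     idx = 0
--     wait_times = defaultdict(int)
--     queue = []
--
--     while idx < len(program) or queue:
--         while idx < len(program) and program[idx][1] <= time:
--             heapq.heappush(queue, (program[idx][0], program[idx][1], program[idx][2]))
--             idx += 1
--
--         if queue:
--             score, call_time, exec_time = heapq.heappop(queue)
--             wait_time = time - call_time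
--             wait_times[score] += wait_time
--             time += exec_time
--         else:
--             if idx < len(program):
--                 time = program[idx][1]
--     answer = [time] + [wait_times[i] for i in range(1, 11)]
--     return answer
-- ===== SOURCE B (Python) =====
-- def solution(program):
--     # Counted loop: exactly one job runs per iteration (the idle jump is folded
--     # into the iteration); ready jobs sit in 'arrived', waits in a fixed list.
--     # Sorts 'program' in place like A.
--     program.sort(key=lambda x: (x[1], x[0]))
--     jobs = [(p[0], p[1], p[2]) for p in program]
--     waits = [0] * 11
--     time = 0
--     i = 0
--     arrived = []
--     for _ in range(len(jobs)):
--         while i < len(jobs) and jobs[i][1] <= time: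
--             arrived.append(jobs[i])
--             i += 1
--         if not arrived:
--             time = jobs[i][1]
--             while i < len(jobs) and jobs[i][1] <= time:
--                 arrived.append(jobs[i])
--                 i += 1
--         s, c, e = min(arrived)
--         arrived.remove((s, c, e))
--         if 1 <= s <= 10:
--             waits[s] += time - c
--         time += e
--     return [time] + waits[1:]
-- ===== Notes on version B (the rewrite author's own statement) =====
-- stated objective: alternative
-- what changed: Replaces A's event-driven while-loop with a heap by a counted for-loop that runs exactly one job per iteration (the idle time-jump is folded into the iteration), keeps ready jobs in a plain 'arrived' list selected with builtin min, and accumulates wait times in a fixed 11-slot list instead of a defaultdict.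
import Mathlib
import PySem

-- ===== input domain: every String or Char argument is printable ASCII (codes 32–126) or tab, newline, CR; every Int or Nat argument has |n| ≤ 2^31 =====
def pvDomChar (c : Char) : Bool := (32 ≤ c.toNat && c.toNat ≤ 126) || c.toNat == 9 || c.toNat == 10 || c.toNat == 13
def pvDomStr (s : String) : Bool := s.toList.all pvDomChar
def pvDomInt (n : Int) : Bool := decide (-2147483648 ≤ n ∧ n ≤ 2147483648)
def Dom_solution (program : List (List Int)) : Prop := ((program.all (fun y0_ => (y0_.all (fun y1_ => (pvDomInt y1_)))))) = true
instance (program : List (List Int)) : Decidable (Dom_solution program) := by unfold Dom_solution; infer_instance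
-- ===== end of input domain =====

-- B replaces A's event-driven while-loop + heap by a counted loop that runs exactly
-- one job per iteration (idle jump folded in), a plain 'arrived' list with builtin
-- min, and a fixed 11-slot wait list (alternative decomposition, same cost class);
-- both sort 'program' in place, so the caller-visible mutation is unchanged;
-- equivalence is about the return value.

-- shared helpers (both Pythons read row fields r[i] and compare int tuples with Python's <)
-- r[i] for 0 ≤ i < len r (guaranteed by Pre_solution); .getD 0 only totalizes
def fld (r : List Int) (i : Int) : Int := (PySem.List.pyGet? r i).getD 0

-- Python's lexicographic '<' on 3-tuples of ints (exact)
def tripLt (a b : Int × Int × Int) : Bool :=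
  a.1 < b.1 || (a.1 == b.1 && (a.2.1 < b.2.1 || (a.2.1 == b.2.1 && a.2.2 < b.2.2)))

-- termination helpers for PORT A: a list is fully split by takeWhile/dropWhile, and
-- the 'still waiting for the next call time' indicator of A's loop
theorem tw_dw_length {α : Type} (p : α → Bool) (l : List α) :
    (l.takeWhile p).length + (l.dropWhile p).length = l.length := by
  rw [← List.length_append, List.takeWhile_append_dropWhile]

theorem takeWhile_nil_cons {α : Type} (p : α → Bool) (x : α) (t : List α)
    (h : (x :: t).takeWhile p = []) : p x = false := by
  rw [List.takeWhile_cons] at h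
  by_cases hp : p x = true
  · simp [hp] at h
  · simpa using hp

def indA (l : List (List Int)) (t : Int) : Nat :=
  match l with | [] => 0 | p :: _ => if fld p 1 ≤ t then 0 else 1

theorem indA_le_one (l : List (List Int)) (t : Int) : indA l t ≤ 1 := by
  unfold indA; split
  · omega
  · split <;> omega

-- ===== PORT A =====
-- heapq.heappush/heappop ported as an ordered-insert priority queue (insert keeping
-- the list sorted by tripLt; pop = head).  Exact here: the heap holds totally ordered
-- Int-triples and heappop returns the least element (tied elements are identical
-- values), which is precisely the head of the sorted list.
def heappush (q : List (Int × Int × Int)) (x : Int × Int × Int) : List (Int × Int × Int) :=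
  match q with
  | [] => [x]
  | h :: t => if tripLt x h then x :: h :: t else h :: heappush t x

theorem heappush_length (q : List (Int × Int × Int)) (x : Int × Int × Int) :
    (heappush q x).length = q.length + 1 := by
  induction q with
  | nil => rfl
  | cons h t ih => simp only [heappush]; split <;> simp [ih]

theorem foldl_heappush_length (l : List (List Int)) (q : List (Int × Int × Int)) :
    (l.foldl (fun q p => heappush q (fld p 0, fld p 1, fld p 2)) q).length
      = q.length + l.length := by
  induction l generalizing q with
  | nil => rfl
  | cons p l ih => simp [List.foldl_cons, ih, heappush_length]; omega

-- A's main while-loop: state = (remaining sorted programs, heap, time, wait_times)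
def loopA (rest : List (List Int)) (queue : List (Int × Int × Int)) (time : Int)
    (wait : PySem.Dict Int Int) : Int × PySem.Dict Int Int :=
  -- inner while: push every program whose call time has arrived
  let ready := rest.takeWhile (fun p => decide (fld p 1 ≤ time))
  let rest' := rest.dropWhile (fun p => decide (fld p 1 ≤ time))
  let q' := ready.foldl (fun q p => heappush q (fld p 0, fld p 1, fld p 2)) queue
  match hq : q' with
  | (s, c, e) :: qt =>
      loopA rest' qt (time + e) (wait.modify s 0 (· + (time - c)))
  | [] =>
      match hr : rest' with
      | p :: _ => loopA rest' [] (fld p 1) wait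
      | [] => (time, wait)
termination_by 2 * (rest.length + queue.length) + indA rest time
decreasing_by
  · -- pop branch: one element leaves rest ∪ queue
    have h1 := tw_dw_length (fun p => decide (fld p 1 ≤ time)) rest
    have h2 : q'.length = queue.length + ready.length := foldl_heappush_length ..
    rw [hq] at h2
    simp only [List.length_cons] at h2
    simp only [ready] at h1 h2
    have hb1 := indA_le_one (rest.dropWhile (fun p => decide (fld p 1 ≤ time))) (time + e)
    have hb2 := indA_le_one rest time
    omega
  · -- jump branch: queue and ready are empty, time advances to the next call time
    have h2 : q'.length = queue.length + ready.length := foldl_heappush_length ..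
    rw [hq] at h2
    simp only [List.length_nil] at h2
    have hqe : queue = [] := by
      cases queue with
      | nil => rfl
      | cons a b => exact absurd h2 (by simp only [List.length_cons]; omega)
    have htw : rest.takeWhile (fun p => decide (fld p 1 ≤ time)) = [] := by
      have : ready.length = 0 := by rw [hqe] at h2; simpa using h2.symm
      simpa [ready] using List.eq_nil_of_length_eq_zero this
    have hdw : rest.dropWhile (fun p => decide (fld p 1 ≤ time)) = rest := by
      cases hc : rest with
      | nil => simp
      | cons a b =>
        rw [hc] at htw
        exact List.dropWhile_cons_of_neg (by simp [takeWhile_nil_cons _ a b htw])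
    rename_i tl
    have hrest : rest = p :: tl := by
      rw [← hdw]; simpa [rest'] using hr
    have hpa' : ¬ fld p 1 ≤ time := by
      rw [hrest] at htw
      simpa using takeWhile_nil_cons _ p tl htw
    rw [hdw, hqe, hrest]
    simp [indA, hpa']

def solution (program : List (List Int)) : List Int :=
  let prog := PySem.List.sorted2 program (fun x => fld x 1) (fun x => fld x 0)
  let r := loopA prog [] 0 PySem.Dict.empty
  r.1 :: (PySem.List.pyRange 1 11 1).map (fun i => r.2.getD i 0)

-- ===== PORT B =====
-- B keeps the jobs as (score, call, exec) triples
def trip (r : List Int) : Int × Int × Int := (fld r 0, fld r 1, fld r 2)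

-- Python's builtin min over the nonempty 'arrived' list (first minimal tuple)
def pickMin (b0 : Int × Int × Int) (bt : List (Int × Int × Int)) : Int × Int × Int :=
  bt.foldl (fun best j => if tripLt j best then j else best) b0

-- 'if 1 <= s <= 10: waits[s] += time - c'; exact: the guard puts s inside the
-- 11-slot list, so the .getD 0 totalization of waits[s] is never taken out of range
def bump (w : List Int) (s d : Int) : List Int :=
  if 1 ≤ s ∧ s ≤ 10 then w.set s.toNat ((PySem.List.pyGet? w s).getD 0 + d) else w

-- tail of the loop body: s,c,e = min(arrived); arrived.remove(...); record; advance.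
-- The [] case is unreachable (fuel = number of unexecuted jobs); it returns the
-- state unchanged only to keep the function total.
def runJob (pending avail : List (Int × Int × Int)) (time : Int) (w : List Int) :
    List (Int × Int × Int) × List (Int × Int × Int) × Int × List Int :=
  match avail with
  | [] => (pending, [], time, w)
  | b0 :: bt =>
      let best := pickMin b0 bt
      (pending, (b0 :: bt).erase best, time + best.2.2, bump w best.1 (time - best.2.1))

-- 'for _ in range(len(jobs))': one job executed per fuel step; the idle jump is
-- part of the same iteration
def loopB : Nat → List (Int × Int × Int) → List (Int × Int × Int) → Int → List Int →
    Int × List Int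
  | 0, _, _, time, w => (time, w)
  | Nat.succ k, pending, arrived, time, w =>
      let r := pending.takeWhile (fun p => decide (p.2.1 ≤ time))
      let pending' := pending.dropWhile (fun p => decide (p.2.1 ≤ time))
      let st :=
        if arrived ++ r = [] then
          match pending' with
          | [] => (pending', ([] : List (Int × Int × Int)), time, w)  -- unreachable
          | q :: _ =>
              runJob (pending'.dropWhile (fun p => decide (p.2.1 ≤ q.2.1)))
                (pending'.takeWhile (fun p => decide (p.2.1 ≤ q.2.1))) q.2.1 w
        else runJob pending' (arrived ++ r) time w
      loopB k st.1 st.2.1 st.2.2.1 st.2.2.2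

def solution_alt (program : List (List Int)) : List Int :=
  let prog := PySem.List.sorted2 program (fun x => fld x 1) (fun x => fld x 0)
  let jobs := prog.map trip
  let r := loopB jobs.length jobs [] 0 (List.replicate 11 0)
  r.1 :: PySem.List.slice r.2 (some 1) none

-- ===== PRECONDITION & SPEC =====
-- Pre_ excludes programs containing a row of fewer than 3 ints: there Python A
-- raises (IndexError while sorting or pushing), returning no value.
def Pre_solution (program : List (List Int)) : Prop := ∀ row ∈ program, 3 ≤ row.length
instance (program : List (List Int)) : Decidable (Pre_solution program) := by
  unfold Pre_solution; infer_instance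

def pvWitness_solution : List (List Int) := [[1, 0, 2], [3, 1, 3], [2, 1, 1]]

def Spec_solution (program : List (List Int)) (out : List Int) : Prop := out = solution_alt program
instance (program : List (List Int)) (out : List Int) : Decidable (Spec_solution program out) := by
  unfold Spec_solution; infer_instance

-- ===== CLAIM (what is proved, stated in full; the proofs are below) =====
def Claim_equal_solution : Prop := ∀ (program : List (List Int)), Dom_solution program → Pre_solution program → Spec_solution program (solution program)

-- ===== LEMMAS AND PROOFS =====

theorem tripLt_irrefl (a : Int × Int × Int) : tripLt a a = false := by
  simp [tripLt]

theorem tripLt_asymm {a b : Int × Int × Int} (h : tripLt a b = true) : tripLt b a = false := by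
  rcases a with ⟨a1, a2, a3⟩; rcases b with ⟨b1, b2, b3⟩
  simp only [tripLt, Bool.or_eq_true, Bool.and_eq_true, beq_iff_eq, decide_eq_true_eq,
    Bool.or_eq_false_iff, Bool.and_eq_false_iff, decide_eq_false_iff_not, beq_eq_false_iff_ne,
    not_lt] at h ⊢
  omega

theorem tripLt_antisymm {a b : Int × Int × Int} (h1 : tripLt a b = false)
    (h2 : tripLt b a = false) : a = b := by
  rcases a with ⟨a1, a2, a3⟩; rcases b with ⟨b1, b2, b3⟩
  simp only [tripLt, Bool.or_eq_false_iff, Bool.and_eq_false_iff,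
    decide_eq_false_iff_not, beq_eq_false_iff_ne, not_lt] at h1 h2
  have : a1 = b1 ∧ a2 = b2 ∧ a3 = b3 := by omega
  simp [this.1, this.2.1, this.2.2]

theorem tripLe_trans {a b c : Int × Int × Int} (h1 : tripLt b a = false)
    (h2 : tripLt c b = false) : tripLt c a = false := by
  rcases a with ⟨a1, a2, a3⟩; rcases b with ⟨b1, b2, b3⟩; rcases c with ⟨c1, c2, c3⟩
  simp only [tripLt, Bool.or_eq_false_iff, Bool.and_eq_false_iff,
    decide_eq_false_iff_not, beq_eq_false_iff_ne, not_lt] at h1 h2 ⊢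
  omega

theorem heappush_perm (q : List (Int × Int × Int)) (x : Int × Int × Int) :
    (heappush q x).Perm (x :: q) := by
  induction q with
  | nil => simp [heappush]
  | cons h t ih =>
    simp only [heappush]
    split
    · exact List.Perm.refl _
    · exact (ih.cons h).trans (List.Perm.swap x h t)

theorem heappush_pairwise {q : List (Int × Int × Int)} (x : Int × Int × Int)
    (hq : q.Pairwise (fun a b => tripLt b a = false)) :
    (heappush q x).Pairwise (fun a b => tripLt b a = false) := by
  induction q with
  | nil => simp [heappush]
  | cons h t ih =>
    rw [List.pairwise_cons] at hq
    simp only [heappush]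
    split
    · rename_i hlt
      refine List.Pairwise.cons ?_ (List.Pairwise.cons hq.1 hq.2)
      intro y hy
      rcases List.mem_cons.mp hy with rfl | hy'
      · exact tripLt_asymm hlt
      · exact tripLe_trans (tripLt_asymm hlt) (hq.1 y hy')
    · rename_i hnlt
      refine List.Pairwise.cons ?_ (ih hq.2)
      intro y hy
      have : y ∈ x :: t := (heappush_perm t x).mem_iff.mp hy
      rcases List.mem_cons.mp this with rfl | hy'
      · simpa using hnlt
      · exact hq.1 y hy'

theorem foldl_heappush_perm (l : List (List Int)) (q a : List (Int × Int × Int))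
    (h : q.Perm a) :
    (l.foldl (fun q p => heappush q (fld p 0, fld p 1, fld p 2)) q).Perm (a ++ l.map trip) := by
  induction l generalizing q a with
  | nil => simpa using h
  | cons p l ih =>
    simp only [List.foldl_cons, List.map_cons]
    have h1 : (heappush q (fld p 0, fld p 1, fld p 2)).Perm (a ++ [trip p]) := by
      refine (heappush_perm q _).trans ?_
      exact ((h.cons _).trans (List.perm_append_singleton _ _).symm)
    have := ih _ _ h1
    rwa [List.append_assoc, List.singleton_append] at this

theorem foldl_heappush_pairwise (l : List (List Int)) (q : List (Int × Int × Int))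
    (hq : q.Pairwise (fun a b => tripLt b a = false)) :
    (l.foldl (fun q p => heappush q (fld p 0, fld p 1, fld p 2)) q).Pairwise
      (fun a b => tripLt b a = false) := by
  induction l generalizing q with
  | nil => exact hq
  | cons p l ih => exact ih _ (heappush_pairwise _ hq)

theorem pickMin_mem (bt : List (Int × Int × Int)) (b0 : Int × Int × Int) :
    pickMin b0 bt ∈ b0 :: bt := by
  induction bt generalizing b0 with
  | nil => simp [pickMin]
  | cons a t ih =>
    have h := ih (if tripLt a b0 then a else b0)
    have hs : pickMin b0 (a :: t) = pickMin (if tripLt a b0 then a else b0) t := rfl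
    rw [hs]
    rcases List.mem_cons.mp h with h1 | h1
    · rw [h1]; split <;> simp
    · simp [List.mem_cons, h1]

theorem pickMin_le (bt : List (Int × Int × Int)) (b0 : Int × Int × Int) :
    ∀ y ∈ b0 :: bt, tripLt y (pickMin b0 bt) = false := by
  induction bt generalizing b0 with
  | nil =>
    intro y hy
    rcases List.mem_cons.mp hy with rfl | hy'
    · exact tripLt_irrefl y
    · simp at hy'
  | cons a t ih =>
    intro y hy
    have hstep : pickMin b0 (a :: t) = pickMin (if tripLt a b0 then a else b0) t := rfl
    have hacc : tripLt b0 (if tripLt a b0 then a else b0) = false ∧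
        tripLt a (if tripLt a b0 then a else b0) = false := by
      by_cases h : tripLt a b0 = true
      · simp [h, tripLt_asymm h, tripLt_irrefl]
      · simp only [Bool.not_eq_true] at h
        simp [h, tripLt_irrefl]
    have hmin := ih (if tripLt a b0 then a else b0)
    have hsm : tripLt (if tripLt a b0 then a else b0)
        (pickMin (if tripLt a b0 then a else b0) t) = false := hmin _ (by simp)
    rw [hstep]
    rcases List.mem_cons.mp hy with rfl | hy'
    · exact tripLe_trans hsm hacc.1
    · rcases List.mem_cons.mp hy' with rfl | hy''
      · exact tripLe_trans hsm hacc.2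
      · exact hmin _ (by simp [hy''])

-- head of the sorted queue = Python's min over any permutation of it
theorem head_eq_pickMin {hd : Int × Int × Int} {qt b0 : _} {bt : List (Int × Int × Int)}
    (hs : (hd :: qt).Pairwise (fun a b => tripLt b a = false))
    (hp : (hd :: qt).Perm (b0 :: bt)) : pickMin b0 bt = hd := by
  have hmem : pickMin b0 bt ∈ hd :: qt := hp.symm.subset (pickMin_mem bt b0)
  have h1 : tripLt (pickMin b0 bt) hd = false := by
    rcases List.mem_cons.mp hmem with heq | hm
    · rw [heq]; exact tripLt_irrefl hd
    · exact (List.pairwise_cons.mp hs).1 _ hm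
  have h2 : tripLt hd (pickMin b0 bt) = false :=
    pickMin_le bt b0 hd (hp.subset (by simp))
  exact tripLt_antisymm h1 h2

-- one removal keeps the multiset correspondence
theorem erase_perm_tail {hd : Int × Int × Int} {qt l : List (Int × Int × Int)}
    (hp : (hd :: qt).Perm l) : (l.erase hd).Perm qt := by
  have := (hp.symm.erase hd)
  rwa [List.erase_cons_head] at this

-- the takeWhile/dropWhile of B's triple list are the images of A's row splits
theorem tw_map (rest : List (List Int)) (t : Int) :
    List.takeWhile (fun p : Int × Int × Int => decide (p.2.1 ≤ t)) (List.map trip rest)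
      = List.map trip (List.takeWhile (fun p => decide (fld p 1 ≤ t)) rest) := by
  rw [List.takeWhile_map]
  rfl

theorem dw_map (rest : List (List Int)) (t : Int) :
    List.dropWhile (fun p : Int × Int × Int => decide (p.2.1 ≤ t)) (List.map trip rest)
      = List.map trip (List.dropWhile (fun p => decide (fld p 1 ≤ t)) rest) := by
  rw [List.dropWhile_map]
  rfl

theorem bump_length (w : List Int) (s d : Int) : (bump w s d).length = w.length := by
  unfold bump; split <;> simp

theorem bump_getD (w : List Int) (s d : Int) (hw : w.length = 11) (j : Nat)
    (h1 : 1 ≤ j) (h2 : j ≤ 10) :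
    (bump w s d).getD j 0 = if (j : Int) = s then w.getD j 0 + d else w.getD j 0 := by
  unfold bump
  split
  · rename_i hs
    have hs' : s.toNat < w.length := by omega
    have hget : (PySem.List.pyGet? w s).getD 0 = w.getD s.toNat 0 := by
      rw [PySem.List.pyGet?_of_nonneg w (by omega)]
      simp [List.getD]
    by_cases hj : (j : Int) = s
    · have hjs : j = s.toNat := by omega
      rw [if_pos hj, hget, hjs]
      simp [List.getD, hs']
    · have hjs : j ≠ s.toNat := by omega
      rw [if_neg hj]
      simp [List.getD, List.getElem?_set_ne (by omega : s.toNat ≠ j)]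
  · rename_i hs
    have : ¬ (j : Int) = s := by omega
    rw [if_neg this]

-- MAIN INVARIANT: A's heap and B's arrived list hold the same multiset of triples,
-- B's fuel counts the unexecuted jobs, and the wait accounts agree on slots 1..10
theorem loop_eq (rest : List (List Int)) (queue : List (Int × Int × Int)) (time : Int)
    (waitA : PySem.Dict Int Int) :
    ∀ (arrived : List (Int × Int × Int)) (w : List Int),
      queue.Pairwise (fun a b => tripLt b a = false) →
      queue.Perm arrived →
      w.length = 11 →
      (∀ j : Nat, 1 ≤ j → j ≤ 10 → w.getD j 0 = waitA.getD (j : Int) 0) →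
      (loopA rest queue time waitA).1
          = (loopB (rest.length + queue.length) (rest.map trip) arrived time w).1 ∧
      (loopB (rest.length + queue.length) (rest.map trip) arrived time w).2.length = 11 ∧
      ∀ j : Nat, 1 ≤ j → j ≤ 10 →
        (loopB (rest.length + queue.length) (rest.map trip) arrived time w).2.getD j 0
          = (loopA rest queue time waitA).2.getD (j : Int) 0 := by
  induction rest, queue, time, waitA using loopA.induct with
  | case1 rest queue time wait ready rest' q' s c e qt hq ih =>
    intro arrived w hsort hperm hwlen hwg
    have hq2 : List.foldl (fun q p => heappush q (fld p 0, fld p 1, fld p 2)) queue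
        (List.takeWhile (fun p => decide (fld p 1 ≤ time)) rest) = (s, c, e) :: qt := hq
    have hperm' : ((s, c, e) :: qt).Perm
        (arrived ++ List.map trip (List.takeWhile (fun p => decide (fld p 1 ≤ time)) rest)) := by
      have := foldl_heappush_perm (List.takeWhile (fun p => decide (fld p 1 ≤ time)) rest)
        queue arrived hperm
      rwa [hq2] at this
    have hsort' : ((s, c, e) :: qt).Pairwise (fun a b => tripLt b a = false) := by
      have := foldl_heappush_pairwise (List.takeWhile (fun p => decide (fld p 1 ≤ time)) rest)
        queue hsort
      rwa [hq2] at this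
    obtain ⟨b0, bt, hab⟩ : ∃ b0 bt, arrived
        ++ List.map trip (List.takeWhile (fun p => decide (fld p 1 ≤ time)) rest) = b0 :: bt := by
      cases hx : arrived ++ List.map trip (List.takeWhile (fun p => decide (fld p 1 ≤ time)) rest) with
      | nil => rw [hx] at hperm'; have := hperm'.length_eq; simp at this
      | cons a b => exact ⟨a, b, rfl⟩
    have hbest : pickMin b0 bt = (s, c, e) := head_eq_pickMin hsort' (hab ▸ hperm')
    -- bookkeeping for the fuel count
    have h1 := tw_dw_length (fun p => decide (fld p 1 ≤ time)) rest
    have h2 := foldl_heappush_length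
      (List.takeWhile (fun p => decide (fld p 1 ≤ time)) rest) queue
    rw [hq2] at h2
    simp only [List.length_cons] at h2
    have hfuel : rest.length + queue.length
        = ((List.dropWhile (fun p => decide (fld p 1 ≤ time)) rest).length + qt.length) + 1 := by
      omega
    have hA : loopA rest queue time wait
        = loopA (List.dropWhile (fun p => decide (fld p 1 ≤ time)) rest) qt (time + e)
            (wait.modify s 0 (· + (time - c))) := by
      conv_lhs => rw [loopA.eq_def]
      dsimp only
      split
      · rename_i s' c' e' qt' heq
        rw [hq2] at heq
        simp only [List.cons.injEq, Prod.mk.injEq] at heq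
        obtain ⟨⟨rfl, rfl, rfl⟩, rfl⟩ := heq
        rfl
      · rename_i heq
        rw [hq2] at heq
        simp at heq
    have hB : loopB (rest.length + queue.length) (rest.map trip) arrived time w
        = loopB ((List.dropWhile (fun p => decide (fld p 1 ≤ time)) rest).length + qt.length)
            (List.map trip (List.dropWhile (fun p => decide (fld p 1 ≤ time)) rest))
            ((b0 :: bt).erase (s, c, e)) (time + e) (bump w s (time - c)) := by
      rw [hfuel]
      simp only [loopB]
      rw [tw_map, dw_map, hab]
      rw [if_neg (by simp)]
      simp only [runJob, hbest]
    rw [hA, hB]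
    exact ih _ _ (List.pairwise_cons.mp hsort').2
      (erase_perm_tail (hab ▸ hperm')).symm
      (by rw [bump_length]; exact hwlen)
      (by
        intro j hj1 hj2
        rw [bump_getD w s (time - c) hwlen j hj1 hj2, PySem.Dict.getD_modify]
        split_ifs with hjs
        · rw [hwg j hj1 hj2, hjs]
        · rw [hwg j hj1 hj2])
  | case2 rest queue time wait ready rest' q' hq p tl hr ih =>
    intro arrived w hsort hperm hwlen hwg
    have hq2 : List.foldl (fun q p => heappush q (fld p 0, fld p 1, fld p 2)) queue
        (List.takeWhile (fun p => decide (fld p 1 ≤ time)) rest) = [] := hq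
    have hr2 : List.dropWhile (fun p => decide (fld p 1 ≤ time)) rest = p :: tl := hr
    have hlen := foldl_heappush_length
      (List.takeWhile (fun p => decide (fld p 1 ≤ time)) rest) queue
    rw [hq2] at hlen
    simp only [List.length_nil] at hlen
    have hqe : queue = [] := List.eq_nil_of_length_eq_zero (by omega)
    have htw : List.takeWhile (fun p => decide (fld p 1 ≤ time)) rest = [] :=
      List.eq_nil_of_length_eq_zero (by omega)
    have hdw : List.dropWhile (fun p => decide (fld p 1 ≤ time)) rest = rest := by
      cases hc : rest with
      | nil => simp
      | cons a b =>
        rw [hc] at htw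
        exact List.dropWhile_cons_of_neg (by simp [takeWhile_nil_cons _ a b htw])
    have harr : arrived = [] := by
      rw [hqe] at hperm
      exact hperm.symm.eq_nil
    have hrest : rest = p :: tl := by rw [← hdw, hr2]
    have hA : loopA rest queue time wait
        = loopA (List.dropWhile (fun p => decide (fld p 1 ≤ time)) rest) [] (fld p 1) wait := by
      conv_lhs => rw [loopA.eq_def]
      dsimp only
      split
      · rename_i s' c' e' qt' heq
        rw [hq2] at heq
        simp at heq
      · split
        · rename_i p' tl' heq2
          rw [hr2] at heq2
          simp only [List.cons.injEq] at heq2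
          obtain ⟨rfl, rfl⟩ := heq2
          rfl
        · rename_i heq2
          rw [hr2] at heq2
          simp at heq2
    -- B performs the idle time-jump inside the same (fuel-consuming) iteration:
    -- unfolding one step at 'time' and one step at the jumped time gives the
    -- same runJob state
    have htrip : decide ((trip p).2.1 ≤ fld p 1) = true := by simp [trip]
    have hB : loopB (rest.length + queue.length) (rest.map trip) arrived time w
        = loopB (rest.length + 0) (rest.map trip) [] (fld p 1) w := by
      rw [hqe, harr]
      have hsucc : rest.length + ([] : List (Int × Int × Int)).length = tl.length + 1 := by
        rw [hrest]; simp
      rw [hsucc]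
      have hsucc2 : rest.length + 0 = tl.length + 1 := by rw [hrest]; simp
      rw [hsucc2]
      simp only [loopB]
      rw [tw_map, dw_map, htw, hdw]
      rw [if_pos (by simp)]
      have hcons : List.map trip rest = trip p :: List.map trip tl := by
        rw [hrest]; rfl
      rw [hcons]
      rw [if_neg (by
        rw [List.takeWhile_cons, htrip]
        simp [trip])]
      simp only [List.nil_append]
      rfl
    rw [hA, hB, hdw]
    have hres := ih [] w (by simp) (List.Perm.refl []) hwlen hwg
    have hdw' : rest' = rest := hdw
    rw [hdw'] at hres
    simp only [List.length_nil] at hres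
    exact hres
  | case3 rest queue time wait ready rest' q' hq hr =>
    intro arrived w hsort hperm hwlen hwg
    have hq2 : List.foldl (fun q p => heappush q (fld p 0, fld p 1, fld p 2)) queue
        (List.takeWhile (fun p => decide (fld p 1 ≤ time)) rest) = [] := hq
    have hr2 : List.dropWhile (fun p => decide (fld p 1 ≤ time)) rest = [] := hr
    have hlen := foldl_heappush_length
      (List.takeWhile (fun p => decide (fld p 1 ≤ time)) rest) queue
    rw [hq2] at hlen
    simp only [List.length_nil] at hlen
    have hqe : queue = [] := List.eq_nil_of_length_eq_zero (by omega)
    have htw : List.takeWhile (fun p => decide (fld p 1 ≤ time)) rest = [] :=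
      List.eq_nil_of_length_eq_zero (by omega)
    have hre : rest = [] := by
      have := tw_dw_length (fun p => decide (fld p 1 ≤ time)) rest
      rw [htw, hr2] at this
      exact List.eq_nil_of_length_eq_zero (by simpa using this.symm)
    have hA : loopA rest queue time wait = (time, wait) := by
      conv_lhs => rw [loopA.eq_def]
      dsimp only
      split
      · rename_i s' c' e' qt' heq
        rw [hq2] at heq
        simp at heq
      · split
        · rename_i p' tl' heq2
          rw [hr2] at heq2
          simp at heq2
        · rfl
    have hB : loopB (rest.length + queue.length) (rest.map trip) arrived time w = (time, w) := by
      rw [hre, hqe]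
      rfl
    rw [hA, hB]
    exact ⟨rfl, hwlen, fun j hj1 hj2 => hwg j hj1 hj2⟩

-- ===== VERDICT =====
theorem solution_spec : Claim_equal_solution := by
  unfold Claim_equal_solution
  intro program _ _
  unfold Spec_solution solution solution_alt
  simp only [List.length_map]
  have h := loop_eq (PySem.List.sorted2 program (fun x => fld x 1) (fun x => fld x 0))
    [] 0 PySem.Dict.empty [] (List.replicate 11 0) (by simp) (List.Perm.refl _)
    (by simp) (by
      intro j h1 h2
      interval_cases j <;> rfl)
  simp only [List.length_nil, Nat.add_zero] at h
  obtain ⟨hhd, hlen, hg⟩ := h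
  rw [hhd, PySem.List.slice_from_one]
  have hrange : PySem.List.pyRange 1 11 1 = [1, 2, 3, 4, 5, 6, 7, 8, 9, 10] := by decide
  rw [hrange]
  congr 1
  cases hc : (loopB (PySem.List.sorted2 program (fun x => fld x 1) (fun x => fld x 0)).length
      ((PySem.List.sorted2 program (fun x => fld x 1) (fun x => fld x 0)).map trip) [] 0
      (List.replicate 11 0)).2 with
  | nil => rw [hc] at hlen; simp at hlen
  | cons w0 t =>
    rw [hc] at hlen hg
    simp only [List.length_cons] at hlen
    simp only [List.tail_cons]
    refine List.ext_getElem ?_ ?_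
    · simp only [List.length_map]
      simp
      omega
    · intro i hi1 hi2
      simp only [List.length_map] at hi1
      have hi10 : i < 10 := by simpa using hi1
      rw [List.getElem_map]
      have hgt : t[i] = (w0 :: t).getD (i + 1) 0 := by
        rw [List.getD_cons_succ]
        rw [List.getD_eq_getElem _ _ (by omega)]
      rw [hgt, hg (i + 1) (by omega) (by omega)]
      interval_cases i <;> norm_num
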